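-- pv_equiv track=rewrite | github.com/MGaulia/AdventOfCode2024 | 9.py | joinzeros
-- ===== SOURCE A (Python) =====
-- dotset = set(".")
--
-- def joinzeros(temp):
--     newtemp = []
--     tempdots = ""
--     for t in temp:
--         if set(t) == dotset:
--             tempdots += t
--         else:
--             if len(tempdots) > 0:
--                 newtemp.append(tempdots)
--                 tempdots = ""
--             newtemp.append(t)
--     if len(tempdots) > 0:
--         newtemp.append(tempdots)
--
--     return newtemp
-- ===== SOURCE B (Python) =====
-- # Idiomatic re-implementation: a single itertools.groupby pass keyed on the
-- # all-dots predicate replaces A's manual tempdots accumulator and its two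
-- # flush points.
-- from itertools import groupby
--
-- dotset = set(".")
--
-- def joinzeros(temp):
--     out = []
--     for is_dot, group in groupby(temp, key=lambda t: set(t) == dotset):
--         if is_dot:
--             out.append(''.join(group))
--         else:
--             out.extend(group)
--     return out
-- ===== Notes on version B (the rewrite author's own statement) =====
-- stated objective: idiomatic
-- what changed: Replaces A's manual running-accumulator loop with its two flush points by a single itertools.groupby pass keyed on the all-dots predicate, joining each dot-run and extending with each non-dot run.
import Mathlib
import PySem

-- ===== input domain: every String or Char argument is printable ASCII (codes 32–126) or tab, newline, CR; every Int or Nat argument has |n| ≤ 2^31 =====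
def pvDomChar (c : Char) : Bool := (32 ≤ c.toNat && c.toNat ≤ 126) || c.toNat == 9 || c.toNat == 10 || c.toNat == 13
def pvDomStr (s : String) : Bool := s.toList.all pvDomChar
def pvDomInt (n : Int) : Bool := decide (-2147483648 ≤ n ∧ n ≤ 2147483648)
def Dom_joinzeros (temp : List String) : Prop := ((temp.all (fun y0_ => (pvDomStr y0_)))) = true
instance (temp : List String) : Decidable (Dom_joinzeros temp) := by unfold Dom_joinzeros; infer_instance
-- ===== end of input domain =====

-- B replaces A's manual running accumulator (with its two flush points) by a single
-- grouping pass (itertools.groupby keyed on the all-dots predicate); same result, idiomatic.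

-- shared key predicate: Python's `set(t) == dotset`
def pvIsDot (t : String) : Bool :=
  PySem.Set.equal (PySem.Set.ofList t.toList) (PySem.Set.ofList ['.'])

-- ===== PORT A =====
-- the for-loop of A as structural recursion over the same state (newtemp, tempdots)
def joinzerosAux (newtemp : List String) (tempdots : List Char) : List String → List String
  | [] => if tempdots.length > 0 then newtemp ++ [String.ofList tempdots] else newtemp
  | t :: ts =>
    if pvIsDot t then joinzerosAux newtemp (tempdots ++ t.toList) ts
    else if tempdots.length > 0 then joinzerosAux (newtemp ++ [String.ofList tempdots, t]) [] ts
    else joinzerosAux (newtemp ++ [t]) [] ts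

def joinzeros (temp : List String) : List String := joinzerosAux [] [] temp

-- ===== PORT B =====
-- groupby: peel the maximal run sharing the head's key; join a dot-run, extend otherwise
def joinzeros_alt : List String → List String
  | [] => []
  | t :: ts =>
    let k := pvIsDot t
    let grp := (t :: ts).takeWhile (fun s => pvIsDot s == k)
    let rest := ts.dropWhile (fun s => pvIsDot s == k)
    if k then String.ofList (grp.flatMap String.toList) :: joinzeros_alt rest
    else grp ++ joinzeros_alt rest
termination_by l => l.length
decreasing_by
  all_goals
    simp only [List.length_cons]
    exact Nat.lt_succ_of_le (List.length_dropWhile_le _ _)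

-- ===== PRECONDITION & SPEC =====
def Spec_joinzeros (temp : List String) (out : List String) : Prop := out = joinzeros_alt temp
instance (temp : List String) (out : List String) : Decidable (Spec_joinzeros temp out) := by unfold Spec_joinzeros; infer_instance

-- ===== CLAIM (what is proved, stated in full; the proofs are below) =====
def Claim_equal_joinzeros : Prop := ∀ (temp : List String), Dom_joinzeros temp → Spec_joinzeros temp (joinzeros temp)

-- ===== LEMMAS AND PROOFS =====

theorem pvIsDot_iff (t : String) :
    pvIsDot t = true ↔ t.toList ≠ [] ∧ ∀ c ∈ t.toList, c = '.' := by
  unfold pvIsDot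
  rw [PySem.Set.equal_iff]
  constructor
  · intro h
    have hdot : ('.' : Char) ∈ t.toList := by
      have := (h '.').mpr (by simp [PySem.Set.mem_ofList])
      simpa [PySem.Set.mem_ofList] using this
    refine ⟨by intro he; simp [he] at hdot, ?_⟩
    intro c hc
    have := (h c).mp (by simpa [PySem.Set.mem_ofList] using hc)
    simpa [PySem.Set.mem_ofList] using this
  · rintro ⟨hne, hall⟩ x
    simp only [PySem.Set.mem_ofList, List.mem_singleton]
    constructor
    · exact fun hx => hall x hx
    · intro hx
      subst hx
      cases hcs : t.toList with
      | nil => exact absurd hcs hne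
      | cons c cs =>
        have hc : c = '.' := hall c (by simp [hcs])
        simp [hc]

theorem pvIsDot_ofList {l : List Char} (hne : l ≠ []) (hall : ∀ c ∈ l, c = '.') :
    pvIsDot (String.ofList l) = true := by
  rw [pvIsDot_iff]
  simpa using ⟨hne, hall⟩

theorem dot_toList_ne {t : String} (h : pvIsDot t = true) : t.toList ≠ [] :=
  ((pvIsDot_iff t).mp h).1

theorem dot_toList_all {t : String} (h : pvIsDot t = true) : ∀ c ∈ t.toList, c = '.' :=
  ((pvIsDot_iff t).mp h).2

-- A's accumulator is a pure prefix of the result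
theorem joinzerosAux_append : ∀ (ts : List String) (acc : List String) (d : List Char),
    joinzerosAux acc d ts = acc ++ joinzerosAux [] d ts := by
  intro ts
  induction ts with
  | nil => intro acc d; simp only [joinzerosAux]; split <;> simp
  | cons t ts ih =>
    intro acc d
    simp only [joinzerosAux]
    split
    · exact ih _ _
    · simp only [List.nil_append]
      split
      · rw [ih (acc ++ [String.ofList d, t]) [], ih [String.ofList d, t] []]; simp
      · rw [ih (acc ++ [t]) [], ih [t] []]; simp

theorem alt_cons_not {t : String} (h : pvIsDot t = false) (ts : List String) :
    joinzeros_alt (t :: ts) = t :: joinzeros_alt ts := by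
  rw [joinzeros_alt]
  simp only [h, List.takeWhile_cons, beq_self_eq_true, if_true, Bool.false_eq_true, if_false,
    List.cons_append]
  congr 1
  cases ts with
  | nil => simp [joinzeros_alt]
  | cons u ts' =>
    cases hu : pvIsDot u with
    | true => simp [hu]
    | false =>
      rw [joinzeros_alt]
      simp [hu]

theorem alt_cons_dot {t : String} (h : pvIsDot t = true) (ts : List String) :
    joinzeros_alt (t :: ts) =
      String.ofList (t.toList ++ (ts.takeWhile pvIsDot).flatMap String.toList)
        :: joinzeros_alt (ts.dropWhile pvIsDot) := by
  rw [joinzeros_alt]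
  have hk : (fun s => pvIsDot s == true) = pvIsDot := by
    funext s; cases pvIsDot s <;> rfl
  simp only [h, if_true, hk, List.takeWhile_cons, List.flatMap_cons]

theorem alt_dot_merge {a b : String} (ha : pvIsDot a = true) (hb : pvIsDot b = true)
    (ts : List String) :
    joinzeros_alt (a :: b :: ts) =
      joinzeros_alt (String.ofList (a.toList ++ b.toList) :: ts) := by
  have hm : pvIsDot (String.ofList (a.toList ++ b.toList)) = true := by
    apply pvIsDot_ofList
    · have := dot_toList_ne ha; simp [this]
    · intro c hc
      rcases List.mem_append.mp hc with h' | h'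
      · exact dot_toList_all ha c h'
      · exact dot_toList_all hb c h'
  rw [alt_cons_dot ha, alt_cons_dot hm]
  simp [hb, List.append_assoc]

theorem aux_eq_alt : ∀ (ts : List String) (d : List Char), (∀ c ∈ d, c = '.') →
    joinzerosAux [] d ts =
      if d = [] then joinzeros_alt ts else joinzeros_alt (String.ofList d :: ts) := by
  intro ts
  induction ts with
  | nil =>
    intro d hd
    by_cases hdnil : d = []
    · simp [hdnil, joinzerosAux, joinzeros_alt]
    · have hlen : 0 < d.length := List.length_pos_iff.mpr hdnil
      simp only [joinzerosAux, if_pos hlen, hdnil, if_false, List.nil_append]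
      rw [alt_cons_dot (pvIsDot_ofList hdnil hd)]
      simp [joinzeros_alt]
  | cons t ts ih =>
    intro d hd
    simp only [joinzerosAux]
    cases h : pvIsDot t with
    | true =>
      have hall : ∀ c ∈ d ++ t.toList, c = '.' := by
        intro c hc
        rcases List.mem_append.mp hc with h' | h'
        · exact hd c h'
        · exact dot_toList_all h c h'
      have hne : d ++ t.toList ≠ [] := by
        have := dot_toList_ne h; simp [this]
      rw [ih (d ++ t.toList) hall, if_neg hne]
      by_cases hdnil : d = []
      · simp [hdnil]
      · rw [if_neg hdnil, alt_dot_merge (pvIsDot_ofList hdnil hd) h]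
        simp
    | false =>
      simp only [Bool.false_eq_true, if_false]
      by_cases hdnil : d = []
      · subst hdnil
        simp only [List.length_nil, Nat.lt_irrefl, if_false, List.nil_append]
        rw [joinzerosAux_append, ih [] (by simp)]
        simp [alt_cons_not h]
      · have hlen : 0 < d.length := List.length_pos_iff.mpr hdnil
        simp only [if_pos hlen, if_neg hdnil, List.nil_append]
        rw [joinzerosAux_append, ih [] (by simp), if_pos rfl,
          alt_cons_dot (pvIsDot_ofList hdnil hd)]
        simp only [List.takeWhile_cons, List.dropWhile_cons, h, Bool.false_eq_true, if_false,
          List.flatMap_nil, List.append_nil]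
        rw [alt_cons_not h]
        simp

-- ===== VERDICT (by name: the statement is the Claim_ definition above) =====
theorem joinzeros_spec : Claim_equal_joinzeros := by
  intro temp _
  unfold Spec_joinzeros joinzeros
  rw [aux_eq_alt temp [] (by simp), if_pos rfl]
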